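-- pv_equiv track=rewrite | github.com/GolzitskyNikolay/SPEAC-analysis | speac_library/speac/new_form.py | butlast
-- ===== SOURCE A (Python) =====
-- import copy
--
-- def butlast(some_list, number=1):
--     result = copy.deepcopy(some_list)
--
--     try:
--         for i in range(1, number + 1):
--             result.pop(len(result) - 1)
--         return result
--     except IndexError:
--         return []
-- ===== SOURCE B (Python) =====
-- import copy
--
-- def butlast(some_list, number=1):
--     keep = len(some_list) - number
--     if keep < 0:
--         keep = 0
--     return copy.deepcopy(some_list[:keep])
-- ===== Notes on version B (the rewrite author's own statement) =====
-- stated objective: simpler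
-- what changed: Replaces the pop-one-element-at-a-time loop with try/except by a directly computed clamped keep count and a single slice.
import Mathlib
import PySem

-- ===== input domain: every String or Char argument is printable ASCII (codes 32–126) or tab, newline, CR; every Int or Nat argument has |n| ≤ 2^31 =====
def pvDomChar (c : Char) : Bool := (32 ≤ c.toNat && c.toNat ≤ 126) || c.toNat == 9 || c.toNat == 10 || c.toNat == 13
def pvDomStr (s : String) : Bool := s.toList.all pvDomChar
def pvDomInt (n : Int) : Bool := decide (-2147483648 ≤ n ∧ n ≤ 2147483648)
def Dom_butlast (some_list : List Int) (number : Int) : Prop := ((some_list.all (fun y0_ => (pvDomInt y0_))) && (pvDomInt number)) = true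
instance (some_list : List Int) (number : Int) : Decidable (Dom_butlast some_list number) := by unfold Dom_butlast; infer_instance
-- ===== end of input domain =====

-- B computes the clamped keep count and takes one slice instead of A's repeated pop loop with try/except; return values proved equal on all inputs.


-- ===== PORT A =====
-- the loop body 'result.pop(len(result) - 1)', run once per iteration of 'for i in range(1, number + 1)';
-- 'none' is the raised IndexError, which aborts the loop immediately (as the try/except does)
def butlastLoop (r : List Int) : Nat → Option (List Int)
  | 0 => some r
  | n + 1 =>
    match (PySem.List.pop? r (PySem.List.len r - 1)).map Prod.snd with
    | none => none
    | some r' => butlastLoop r' n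

def butlast (some_list : List Int) (number : Int) : List Int :=
  let result := some_list  -- deepcopy of an int list: same value
  match butlastLoop result ((number + 1 - 1).toNat) with  -- range(1, number+1) has (number+1-1) iterations
  | some r => r
  | none => []  -- except IndexError: return []

-- ===== PORT B =====
def butlast_alt (some_list : List Int) (number : Int) : List Int :=
  let keep := PySem.List.len some_list - number
  let keep := if keep < 0 then 0 else keep
  PySem.List.slice some_list none (some keep)  -- deepcopy of an int list: same value

-- ===== PRECONDITION & SPEC =====
def Spec_butlast (some_list : List Int) (number : Int) (out : List Int) : Prop := out = butlast_alt some_list number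
instance (some_list : List Int) (number : Int) (out : List Int) : Decidable (Spec_butlast some_list number out) := by unfold Spec_butlast; infer_instance

-- ===== CLAIM (what is proved, stated in full; the proofs are below) =====
def Claim_equal_butlast : Prop := ∀ (some_list : List Int) (number : Int), Dom_butlast some_list number → Spec_butlast some_list number (butlast some_list number)

-- ===== LEMMAS AND PROOFS =====

theorem butlastLoop_eq (n : Nat) (r : List Int) :
    butlastLoop r n = if n ≤ r.length then some (r.take (r.length - n)) else none := by
  induction n generalizing r with
  | zero => simp [butlastLoop]
  | succ n ih =>
    cases r with
    | nil => simp [butlastLoop, PySem.List.pop?]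
    | cons y ys =>
      have hlen : PySem.List.len (y :: ys) - 1 = ((ys.length : Nat) : Int) := by
        simp [PySem.List.len_eq]
      have hpop : PySem.List.pop? (y :: ys) (PySem.List.len (y :: ys) - 1)
          = some ((y :: ys)[ys.length], (y :: ys).eraseIdx ys.length) := by
        rw [hlen]
        exact PySem.List.pop?_natCast _ _ (Nat.lt_succ_self ys.length)
      have herase : (y :: ys).eraseIdx ys.length = (y :: ys).dropLast := by
        rw [List.dropLast_eq_take, List.eraseIdx_eq_take_drop_succ]
        simp
      rw [butlastLoop, hpop]
      simp only [Option.map_some, herase]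
      rw [ih]
      have hdl : (y :: ys).dropLast.length = ys.length := by simp
      rw [hdl]
      by_cases h : n ≤ ys.length
      · rw [if_pos h, if_pos (show n + 1 ≤ (y :: ys).length by simp [Nat.succ_le_succ h])]
        congr 1
        rw [List.dropLast_eq_take, List.take_take]
        congr 1
        simp only [List.length_cons]
        omega
      · rw [if_neg h, if_neg (show ¬ (n + 1 ≤ (y :: ys).length) by simp [h])]

-- ===== VERDICT (by name: the statement is the Claim_ definition above) =====
theorem butlast_spec : Claim_equal_butlast := by
  intro some_list number _
  unfold Spec_butlast butlast butlast_alt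
  simp only []
  rw [show ((number + 1 - 1).toNat) = number.toNat by omega, butlastLoop_eq, PySem.List.slice_to]
  · simp only [PySem.List.len_eq]
    by_cases hneg : (some_list.length : Int) - number < 0
    · rw [if_pos hneg, if_neg (show ¬ number.toNat ≤ some_list.length by omega)]
      simp
    · rw [if_neg hneg, if_pos (show number.toNat ≤ some_list.length by omega)]
      show List.take (some_list.length - number.toNat) some_list = _
      by_cases hn : 0 ≤ number
      · congr 1
        omega
      · rw [List.take_of_length_le (by omega), List.take_of_length_le (by omega)]
  · split <;> simp_all [PySem.List.len_eq]
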